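-- pv_equiv track=rewrite | github.com/NeuralBlitz/Linkglys | src/capabilities/cv_capability_kernels.py | _generate_scene_summary
-- ===== SOURCE A (Python) =====
-- from typing import Dict, List, Tuple, Optional, Any
--
-- def _generate_scene_summary(detections: List[Dict]) -> str:
--     """Generate human-readable scene summary"""
--     if not detections:
--         return "No objects detected in scene"
--
--     class_counts = {}
--     for det in detections:
--         cls = det["class"]
--         class_counts[cls] = class_counts.get(cls, 0) + 1
--
--     summary_parts = []
--     for cls, count in sorted(class_counts.items()):
--         if count == 1:
--             summary_parts.append(f"1 {cls}")
--         else: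
--             summary_parts.append(f"{count} {cls}s")
--
--     return f"Detected: {', '.join(summary_parts)}"
-- ===== SOURCE B (Python) =====
-- def _generate_scene_summary(detections):
--     """Generate human-readable scene summary (sort-then-run-length-scan)."""
--     if not detections:
--         return "No objects detected in scene"
--
--     classes = sorted(d["class"] for d in detections)
--     parts = []
--     i = 0
--     n = len(classes)
--     while i < n:
--         j = i
--         while j < n and classes[j] == classes[i]:
--             j += 1
--         count = j - i
--         if count == 1:
--             parts.append(f"1 {classes[i]}")
--         else:
--             parts.append(f"{count} {classes[i]}s")
--         i = j
--
--     return f"Detected: {', '.join(parts)}"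
-- ===== Notes on version B (the rewrite author's own statement) =====
-- stated objective: alternative
-- what changed: Replaced A's dict-counting pass plus sorted-items loop by sorting the raw class list once and emitting one summary part per maximal run in a single run-length scan.
import Mathlib
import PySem

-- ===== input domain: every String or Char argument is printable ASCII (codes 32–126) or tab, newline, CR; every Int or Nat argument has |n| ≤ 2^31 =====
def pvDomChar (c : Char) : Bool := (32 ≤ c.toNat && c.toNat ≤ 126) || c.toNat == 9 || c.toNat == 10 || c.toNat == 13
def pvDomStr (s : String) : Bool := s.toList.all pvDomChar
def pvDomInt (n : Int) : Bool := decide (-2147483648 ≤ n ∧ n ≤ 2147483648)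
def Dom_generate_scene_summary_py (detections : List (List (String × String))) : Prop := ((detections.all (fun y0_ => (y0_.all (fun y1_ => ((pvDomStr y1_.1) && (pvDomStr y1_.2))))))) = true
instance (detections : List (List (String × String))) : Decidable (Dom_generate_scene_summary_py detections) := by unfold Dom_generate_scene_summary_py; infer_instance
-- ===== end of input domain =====

-- B replaces A's dict-counting + sorted-items pass by sorting the raw class list first and
-- emitting one part per run in a single run-length scan (objective: alternative decomposition).

-- ===== PORT A =====
def generate_scene_summary_py (detections : List (List (String × String))) : String :=
  if detections.isEmpty then "No objects detected in scene"
  else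
    let class_counts : PySem.Dict String Int :=
      detections.foldl (fun d det =>
        let cls := (PySem.Dict.mk det).getD "class" ""
        d.insert cls (d.getD cls 0 + 1)) PySem.Dict.empty
    let summary_parts : List String :=
      (PySem.List.sorted2 class_counts.items (fun p => p.1) (fun p => p.2)).foldl
        (fun parts p =>
          if p.2 = 1 then parts ++ ["1 " ++ p.1]
          else parts ++ [PySem.Int.toStr p.2 ++ " " ++ p.1 ++ "s"]) []
    "Detected: " ++ PySem.Str.join ", " summary_parts

-- ===== PORT B =====
-- the outer while-loop of Source B: one output part per maximal run of equal classes
def pvRunParts : List String → List String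
  | [] => []
  | c :: rest =>
      let count := (rest.takeWhile (fun x => x == c)).length + 1
      (if count = 1 then "1 " ++ c else PySem.Int.toStr (count : Int) ++ " " ++ c ++ "s")
        :: pvRunParts (rest.dropWhile (fun x => x == c))
  termination_by l => l.length
  decreasing_by
    simpa using Nat.lt_succ_of_le (List.length_dropWhile_le _ _)

def generate_scene_summary_py_alt (detections : List (List (String × String))) : String :=
  if detections.isEmpty then "No objects detected in scene"
  else
    let classes : List String :=
      PySem.List.sorted (detections.map (fun det => (PySem.Dict.mk det).getD "class" "")) (fun x => x)
    "Detected: " ++ PySem.Str.join ", " (pvRunParts classes)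

-- ===== PRECONDITION & SPEC =====
-- Pre_ excludes inputs where some detection dict has no "class" key: Python A raises KeyError there.
def Pre_generate_scene_summary_py (detections : List (List (String × String))) : Prop :=
  (detections.all (fun det => (PySem.Dict.mk det).contains "class")) = true
instance (detections : List (List (String × String))) : Decidable (Pre_generate_scene_summary_py detections) := by
  unfold Pre_generate_scene_summary_py; infer_instance

def pvWitness_generate_scene_summary_py : (List (List (String × String))) :=
  [[("class", "cat")], [("class", "dog")], [("class", "cat")]]

def Spec_generate_scene_summary_py (detections : List (List (String × String))) (out : String) : Prop := out = generate_scene_summary_py_alt detections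
instance (detections : List (List (String × String))) (out : String) : Decidable (Spec_generate_scene_summary_py detections out) := by unfold Spec_generate_scene_summary_py; infer_instance

-- ===== CLAIM (what is proved, stated in full; the proofs are below) =====
def Claim_equal_generate_scene_summary_py : Prop := ∀ (detections : List (List (String × String))), Dom_generate_scene_summary_py detections → Pre_generate_scene_summary_py detections → Spec_generate_scene_summary_py detections (generate_scene_summary_py detections)

-- ===== LEMMAS AND PROOFS =====

-- the common formatting of one (class, count) pair
def pvFmt (c : String) (n : Int) : String :=
  if n = 1 then "1 " ++ c else PySem.Int.toStr n ++ " " ++ c ++ "s"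

theorem pv_insertBy_congr {α : Type} (f g : α → α → Bool) (x : α) (ys : List α)
    (h : ∀ b ∈ ys, f x b = g x b) : PySem.List.insertBy f x ys = PySem.List.insertBy g x ys := by
  induction ys with
  | nil => rfl
  | cons y ys ih =>
      simp only [PySem.List.insertBy]
      rw [h y (by simp)]
      by_cases hg : g x y = true
      · simp [hg]
      · simp [hg, ih (fun b hb => h b (by simp [hb]))]

theorem pv_foldl_insertBy_congr {α : Type} (f g : α → α → Bool) (l acc : List α)
    (h : ∀ a ∈ l, ∀ b, (b ∈ l ∨ b ∈ acc) → f a b = g a b) :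
    l.foldl (fun acc x => PySem.List.insertBy f x acc) acc
      = l.foldl (fun acc x => PySem.List.insertBy g x acc) acc := by
  induction l generalizing acc with
  | nil => rfl
  | cons x l ih =>
      simp only [List.foldl_cons]
      rw [pv_insertBy_congr f g x acc (fun b hb => h x (by simp) b (Or.inr hb))]
      exact ih _ (fun a ha b hb => h a (by simp [ha]) b (by
        rcases hb with hb | hb
        · exact Or.inl (by simp [hb])
        · rcases (PySem.List.mem_insertBy g x b acc).mp hb with hb | hb
          · exact Or.inl (by simp [hb])
          · exact Or.inr hb))

-- on a list whose elements are determined by their first components, the tuple sort is the fst-sort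
theorem pv_sorted2_eq_sorted_fst {κ : Type} [LinearOrder κ]
    (l : List (κ × Int)) (hinj : ∀ a ∈ l, ∀ b ∈ l, a.1 = b.1 → a = b) :
    PySem.List.sorted2 l (fun p => p.1) (fun p => p.2)
      = PySem.List.sorted l (fun p => p.1) := by
  rw [PySem.List.sorted_eq_foldl_insertBy]
  show List.foldl _ [] l = _
  apply pv_foldl_insertBy_congr
  intro a ha b hb
  rcases hb with hb | hb
  · by_cases hfst : a.1 = b.1
    · have : a = b := hinj a ha b hb hfst
      subst this
      simp
    · rcases lt_or_gt_of_ne hfst with hlt | hgt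
      · simp [hlt, not_lt_of_gt hlt]
      · simp [hgt, not_lt_of_gt hgt]
  · simp at hb

-- count of an element in the flatMap of replicates over a nodup key list
theorem pv_count_flatMap_replicate {κ : Type} [DecidableEq κ]
    (K : List κ) (hK : K.Nodup) (m : κ → Nat) (a : κ) :
    (K.flatMap (fun c => List.replicate (m c) c)).count a
      = if a ∈ K then m a else 0 := by
  induction K with
  | nil => simp
  | cons c K ih =>
      obtain ⟨hc, hK⟩ := List.pairwise_cons.mp hK
      rw [List.flatMap_cons, List.count_append, ih hK, List.count_replicate]
      by_cases hac : a = c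
      · subst hac
        have hnot : a ∉ K := fun h => hc a h rfl
        simp [hnot]
      · simp [hac, Ne.symm hac]

theorem pv_pairwise_flatMap_replicate {κ : Type} [LinearOrder κ]
    (K : List κ) (hK : K.Pairwise (· < ·)) (m : κ → Nat) :
    (K.flatMap (fun c => List.replicate (m c) c)).Pairwise (· ≤ ·) := by
  induction K with
  | nil => simp
  | cons c K ih =>
      obtain ⟨hc, hK⟩ := List.pairwise_cons.mp hK
      rw [List.flatMap_cons, List.pairwise_append]
      refine ⟨List.pairwise_replicate.mpr (by simp), ih hK, ?_⟩
      intro x hx y hy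
      have hxc : x = c := List.eq_of_mem_replicate hx
      rcases List.mem_flatMap.mp hy with ⟨e, he, hye⟩
      have hyd : y = e := List.eq_of_mem_replicate hye
      subst hxc; subst hyd
      exact le_of_lt (hc y he)

theorem pv_takeWhile_eq_nil {α : Type} (p : α → Bool) (l : List α)
    (h : ∀ x ∈ l, p x = false) : l.takeWhile p = [] := by
  cases l with
  | nil => rfl
  | cons y t => simp [h y (by simp)]

theorem pv_dropWhile_eq_self {α : Type} (p : α → Bool) (l : List α)
    (h : ∀ x ∈ l, p x = false) : l.dropWhile p = l := by
  cases l with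
  | nil => rfl
  | cons y t => simp [h y (by simp)]

theorem pv_takeWhile_append_pos {α : Type} (p : α → Bool) (l1 l2 : List α)
    (h : ∀ x ∈ l1, p x = true) : (l1 ++ l2).takeWhile p = l1 ++ l2.takeWhile p := by
  induction l1 with
  | nil => simp
  | cons y t ih =>
      simp [h y (by simp), ih (fun x hx => h x (by simp [hx]))]

theorem pv_dropWhile_append_pos {α : Type} (p : α → Bool) (l1 l2 : List α)
    (h : ∀ x ∈ l1, p x = true) : (l1 ++ l2).dropWhile p = l2.dropWhile p := by
  induction l1 with
  | nil => simp
  | cons y t ih =>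
      simp [h y (by simp), ih (fun x hx => h x (by simp [hx]))]

-- the run-length scan over concatenated runs of strictly increasing classes
theorem pv_runParts_flatMap (K : List String) (hK : K.Pairwise (· < ·))
    (m : String → Nat) (hm : ∀ c ∈ K, 1 ≤ m c) :
    pvRunParts (K.flatMap (fun c => List.replicate (m c) c))
      = K.map (fun c => pvFmt c (m c)) := by
  induction K with
  | nil => simp [pvRunParts]
  | cons c K ih =>
      obtain ⟨hc, hK⟩ := List.pairwise_cons.mp hK
      have hm1 : 1 ≤ m c := hm c (by simp)
      have hrepl : List.replicate (m c) c = c :: List.replicate (m c - 1) c := by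
        conv_lhs => rw [show m c = (m c - 1) + 1 by omega]
        rw [List.replicate_succ]
      have hrest : ∀ x ∈ K.flatMap (fun e => List.replicate (m e) e), (x == c) = false := by
        intro x hx
        rcases List.mem_flatMap.mp hx with ⟨e, he, hxe⟩
        have hxd : x = e := List.eq_of_mem_replicate hxe
        subst hxd
        exact beq_eq_false_iff_ne.mpr (ne_of_gt (hc x he))
      rw [List.flatMap_cons, hrepl]
      show pvRunParts (c :: (List.replicate (m c - 1) c ++ _)) = _
      rw [pvRunParts]
      have hall : ∀ x ∈ List.replicate (m c - 1) c, (fun x => x == c) x = true := by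
        intro x hx
        simp [List.eq_of_mem_replicate hx]
      rw [pv_takeWhile_append_pos _ _ _ hall, pv_takeWhile_eq_nil _ _ hrest,
          pv_dropWhile_append_pos _ _ _ hall, pv_dropWhile_eq_self _ _ hrest,
          List.append_nil, List.length_replicate, ih hK (fun e he => hm e (by simp [he]))]
      rw [List.map_cons]
      congr 1
      simp only [pvFmt]
      rw [show m c - 1 + 1 = m c by omega]
      by_cases h1 : m c = 1
      · simp [h1]
      · have h1' : ¬ ((m c : Int) = 1) := by exact_mod_cast h1
        simp [h1, h1']

-- ===== VERDICT (by name: the statement is the Claim_ definition above) =====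
theorem generate_scene_summary_py_spec : Claim_equal_generate_scene_summary_py := by
  intro detections _hdom _hpre
  unfold Spec_generate_scene_summary_py generate_scene_summary_py generate_scene_summary_py_alt
  by_cases hemp : detections.isEmpty
  · simp [hemp]
  · simp only [hemp]
    set xs : List String := detections.map (fun det => (PySem.Dict.mk det).getD "class" "") with hxs
    set K : List String := PySem.List.sorted (PySem.Set.ofList xs) (fun x => x) with hKdef
    have hKperm : K.Perm (PySem.Set.ofList xs) := PySem.List.sorted_perm _ _ _
    have hKlt : K.Pairwise (· < ·) := PySem.List.sorted_ofList_pairwise_lt xs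
    have hKnodup : K.Nodup := hKlt.imp (fun h => ne_of_lt h)
    have hKmem : ∀ c, c ∈ K ↔ c ∈ xs := by
      intro c
      rw [hKperm.mem_iff]
      exact PySem.Set.mem_ofList xs c
    -- A side: the counting fold is Counter(xs)
    have hcnt : detections.foldl (fun d det =>
        let cls := (PySem.Dict.mk det).getD "class" ""
        d.insert cls (d.getD cls 0 + 1)) PySem.Dict.empty = PySem.Dict.counter xs := by
      rw [← PySem.Dict.foldl_insert_getD_add_one_eq_counter, hxs, List.foldl_map]
    rw [hcnt, PySem.Dict.items_counter]
    -- the sorted2 pass is the fst-sort, which is the strictly increasing arrangement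
    have hinj : ∀ a ∈ (PySem.Set.ofList xs).map (fun k => (k, (xs.count k : Int))),
        ∀ b ∈ (PySem.Set.ofList xs).map (fun k => (k, (xs.count k : Int))), a.1 = b.1 → a = b := by
      intro a ha b hb hab
      rcases List.mem_map.mp ha with ⟨k, _, rfl⟩
      rcases List.mem_map.mp hb with ⟨k', _, rfl⟩
      have hkk : k = k' := hab
      subst hkk
      rfl
    rw [pv_sorted2_eq_sorted_fst _ hinj]
    have hsorted : PySem.List.sorted ((PySem.Set.ofList xs).map (fun k => (k, (xs.count k : Int)))) (fun p => p.1)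
        = K.map (fun k => (k, (xs.count k : Int))) := by
      apply PySem.List.sorted_eq_of_perm_of_pairwise_lt
      · exact hKperm.map _
      · exact List.pairwise_map.mpr (hKlt.imp (fun h => h))
    have hfold : (fun (parts : List String) (p : String × Int) =>
        if p.2 = 1 then parts ++ ["1 " ++ p.1]
        else parts ++ [PySem.Int.toStr p.2 ++ " " ++ p.1 ++ "s"])
        = fun parts p => parts ++ [pvFmt p.1 p.2] := by
      funext parts p
      simp only [pvFmt]
      split_ifs <;> rfl
    rw [hsorted, hfold, PySem.List.foldl_append_singleton_eq_map, List.nil_append, List.map_map]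
    -- B side: the sorted class list is the concatenation of the runs
    have hflat : PySem.List.sorted xs (fun x => x)
        = K.flatMap (fun c => List.replicate (xs.count c) c) := by
      apply PySem.List.sorted_id_eq_of_perm_of_pairwise
      · rw [List.perm_iff_count]
        intro a
        rw [pv_count_flatMap_replicate K hKnodup _ a]
        by_cases ha : a ∈ K
        · simp [ha]
        · simp [ha, List.count_eq_zero.mpr (fun h => ha ((hKmem a).mpr h))]
      · exact pv_pairwise_flatMap_replicate K hKlt _
    rw [hflat, pv_runParts_flatMap K hKlt _ (fun c hc => List.count_pos_iff.mpr ((hKmem c).mp hc))]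
    rfl
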